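-- pv_equiv track=rewrite | github.com/chuthimai/Python | TH1/main.py | arrange_room
-- ===== SOURCE A (Python) =====
-- def arrange_room (n: int, m: int, doan_khach: list):
--     arranged = []
--     for i in range(n):
--         arranged.append(0)
--     for khach in range(m):
--         for i in range(n):
--             if doan_khach[khach] == 0:
--                 break
--             if arranged[i] == 0:
--                 if doan_khach[khach] >= 2:
--                     arranged[i] = 2
--                     doan_khach[khach] -= 2
--                 elif doan_khach[khach] == 1:
--                     arranged[i] = 1
--                     doan_khach[khach] -= 1
--         if doan_khach[khach] > 0:
--             for i in range(n):
--                 if doan_khach[khach] == 0: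
--                     break
--                 if arranged[i] == 1:
--                     arranged[i] += 1
--                     doan_khach[khach] -= 1
--     return arranged
-- ===== SOURCE B (Python) =====
-- def arrange_room(n: int, m: int, doan_khach: list):
--     rooms = [0] * n
--     nr = len(rooms)
--     p = 0           # leftmost still-empty room
--     singles = []    # indices of rooms holding exactly one guest, oldest first
--     s = 0           # head of the singles queue
--     for k in range(m):
--         g = doan_khach[k]
--         while g >= 2 and p < nr:
--             rooms[p] = 2
--             g -= 2
--             p += 1
--         if g == 1 and p < nr:
--             rooms[p] = 1
--             singles.append(p)
--             g = 0
--             p += 1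
--         while g > 0 and s < len(singles):
--             rooms[singles[s]] += 1
--             s += 1
--             g -= 1
--     return rooms
-- ===== Notes on version B (the rewrite author's own statement) =====
-- stated objective: faster
-- what changed: Replaces A's per-group full rescans of all n rooms (two inner loops per group) with a single left-to-right fill: a pointer to the leftmost empty room plus a FIFO queue of indices of half-filled rooms, so each room is touched O(1) times; B reads the group sizes without mutating doan_khach (A mutates it in place).
-- outside the precondition, e.g. on arrange_room(2, 3, [1, 2]): A raises IndexError, B raises IndexError
import Mathlib
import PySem

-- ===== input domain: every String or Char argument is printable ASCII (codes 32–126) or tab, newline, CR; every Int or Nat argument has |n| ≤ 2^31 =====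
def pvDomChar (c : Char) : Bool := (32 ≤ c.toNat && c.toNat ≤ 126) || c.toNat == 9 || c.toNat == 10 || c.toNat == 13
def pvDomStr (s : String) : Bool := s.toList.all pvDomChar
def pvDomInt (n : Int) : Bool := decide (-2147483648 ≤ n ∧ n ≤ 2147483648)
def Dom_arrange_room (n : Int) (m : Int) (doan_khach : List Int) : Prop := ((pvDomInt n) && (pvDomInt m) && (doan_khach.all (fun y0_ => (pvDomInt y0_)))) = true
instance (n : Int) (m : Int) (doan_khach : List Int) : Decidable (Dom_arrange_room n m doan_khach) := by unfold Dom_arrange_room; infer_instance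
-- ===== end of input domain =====

-- B replaces A's per-group full rescans of the rooms with a leftmost-empty pointer plus a FIFO
-- queue of half-filled rooms; the equivalence is about the RETURN value only: A mutates
-- doan_khach in place, B does not.

-- ===== PORT A =====
-- first inner loop of A (scan rooms left to right; break when the group hits 0)
def passA1 : List Int → Int → List Int × Int
  | [], g => ([], g)
  | r :: rs, g =>
    if g = 0 then (r :: rs, g)
    else if r = 0 then
      if 2 ≤ g then
        let p := passA1 rs (g - 2); (2 :: p.1, p.2)
      else if g = 1 then
        let p := passA1 rs (g - 1); (1 :: p.1, p.2)
      else
        let p := passA1 rs g; (r :: p.1, p.2)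
    else
      let p := passA1 rs g; (r :: p.1, p.2)

-- second inner loop of A (top up rooms holding exactly one guest)
def passA2 : List Int → Int → List Int × Int
  | [], g => ([], g)
  | r :: rs, g =>
    if g = 0 then (r :: rs, g)
    else if r = 1 then
      let p := passA2 rs (g - 1); ((r + 1) :: p.1, p.2)
    else
      let p := passA2 rs g; (r :: p.1, p.2)

-- one iteration of A's outer loop over the groups (state: arranged, doan_khach)
def stepA (st : List Int × List Int) (khach : Int) : List Int × List Int :=
  let g := PySem.List.pyGetD st.2 khach 0
  let r1 := passA1 st.1 g
  let d1 := st.2.set khach.toNat r1.2      -- khach ≥ 0 (it comes from range(m))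
  if 0 < r1.2 then
    let r2 := passA2 r1.1 r1.2
    (r2.1, d1.set khach.toNat r2.2)
  else (r1.1, d1)

def arrange_room (n : Int) (m : Int) (doan_khach : List Int) : List Int :=
  let arranged := (PySem.List.pyRange 0 n 1).foldl (fun a _ => a ++ [(0 : Int)]) []
  ((PySem.List.pyRange 0 m 1).foldl stepA (arranged, doan_khach)).1

-- ===== PORT B =====
-- while g >= 2 and p < len(rooms): rooms[p] = 2; g -= 2; p += 1
-- (fuel = g.toNat only makes the loop total: g drops by 2 each iteration, so the fuel never runs out)
def fillPairsGo : Nat → List Int → Int → Int → List Int × Int × Int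
  | 0, rooms, g, p => (rooms, g, p)
  | fuel + 1, rooms, g, p =>
    if 2 ≤ g ∧ p < (rooms.length : Int) then
      fillPairsGo fuel (rooms.set p.toNat 2) (g - 2) (p + 1)
    else (rooms, g, p)

def fillPairs (rooms : List Int) (g : Int) (p : Int) : List Int × Int × Int :=
  fillPairsGo g.toNat rooms g p

-- while g > 0 and s < len(singles): rooms[singles[s]] += 1; s += 1; g -= 1
-- (fuel = g.toNat only makes the loop total: g drops by 1 each iteration)
def topUpGo : Nat → List Int → Int → List Int → Int → List Int × Int × Int
  | 0, rooms, g, _, s => (rooms, g, s)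
  | fuel + 1, rooms, g, singles, s =>
    if 0 < g ∧ s < (singles.length : Int) then
      let i := PySem.List.pyGetD singles s 0
      topUpGo fuel (rooms.set i.toNat (PySem.List.pyGetD rooms i 0 + 1)) (g - 1) singles (s + 1)
    else (rooms, g, s)

def topUp (rooms : List Int) (g : Int) (singles : List Int) (s : Int) : List Int × Int × Int :=
  topUpGo g.toNat rooms g singles s

-- body of B's loop, for one group of size g (state: rooms, p, singles, s)
def stepBcore (st : List Int × Int × List Int × Int) (g : Int) : List Int × Int × List Int × Int :=
  let rooms := st.1; let p := st.2.1; let singles := st.2.2.1; let s := st.2.2.2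
  let f := fillPairs rooms g p
  if f.2.1 = 1 ∧ f.2.2 < (f.1.length : Int) then
    let singles' := singles ++ [f.2.2]
    let t := topUp (f.1.set f.2.2.toNat 1) 0 singles' s
    (t.1, f.2.2 + 1, singles', t.2.2)
  else
    let t := topUp f.1 f.2.1 singles s
    (t.1, f.2.2, singles, t.2.2)

def stepB (doan : List Int) (st : List Int × Int × List Int × Int) (k : Int) : List Int × Int × List Int × Int :=
  stepBcore st (PySem.List.pyGetD doan k 0)

def arrange_room_alt (n : Int) (m : Int) (doan_khach : List Int) : List Int :=
  ((PySem.List.pyRange 0 m 1).foldl (stepB doan_khach) (List.replicate n.toNat 0, 0, [], 0)).1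

-- ===== PRECONDITION & SPEC =====
-- Pre_ excludes exactly the inputs on which the Python A raises IndexError: m > len(doan_khach).
def Pre_arrange_room (n : Int) (m : Int) (doan_khach : List Int) : Prop := m ≤ (doan_khach.length : Int)
instance (n : Int) (m : Int) (doan_khach : List Int) : Decidable (Pre_arrange_room n m doan_khach) := by unfold Pre_arrange_room; infer_instance
def pvWitness_arrange_room : Int × Int × List Int := (3, 2, [3, 1])

def Spec_arrange_room (n : Int) (m : Int) (doan_khach : List Int) (out : List Int) : Prop := out = arrange_room_alt n m doan_khach
instance (n : Int) (m : Int) (doan_khach : List Int) (out : List Int) : Decidable (Spec_arrange_room n m doan_khach out) := by unfold Spec_arrange_room; infer_instance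

-- ===== CLAIM (what is proved, stated in full; the proofs are below) =====
def Claim_equal_arrange_room : Prop := ∀ (n : Int) (m : Int) (doan_khach : List Int), Dom_arrange_room n m doan_khach → Pre_arrange_room n m doan_khach → Spec_arrange_room n m doan_khach (arrange_room n m doan_khach)

-- ===== LEMMAS AND PROOFS =====

-- abstract effect of one group on the block of empty rooms: (#pairs-rooms, #single-room, leftover)
def phase1 : Nat → Int → Nat × Nat × Int
  | 0, g => (0, 0, g)
  | z + 1, g =>
    if 2 ≤ g then
      let r := phase1 z (g - 2); (r.1 + 1, r.2.1, r.2.2)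
    else if g = 1 then (0, 1, 0)
    else (0, 0, g)

-- indices (ascending) of the rooms currently holding exactly one guest
def onesIdx : List Int → List Int
  | [] => []
  | r :: rs => if r = 1 then 0 :: (onesIdx rs).map (· + 1) else (onesIdx rs).map (· + 1)

-- invariant tying B's state to the room list
def InvB (rooms : List Int) (p : Int) (singles : List Int) (s : Int) : Prop :=
  (∃ fil z, rooms = fil ++ List.replicate z 0 ∧ (∀ r ∈ fil, r = 1 ∨ r = 2) ∧ p = (fil.length : Int)) ∧
  0 ≤ s ∧ s ≤ (singles.length : Int) ∧ singles.drop s.toNat = onesIdx rooms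

-- the new room list after one group of A's outer loop
def stepArranged (rooms : List Int) (g : Int) : List Int :=
  let r1 := passA1 rooms g
  if 0 < r1.2 then (passA2 r1.1 r1.2).1 else r1.1

theorem shift_map (l : List Int) (c : Int) :
    (l.map (· + c)).map (· + 1) = l.map (· + (c + 1)) := by
  rw [List.map_map]
  apply List.map_congr_left
  intro x _
  simp [Function.comp]
  ring

theorem set_len_append (a : List Int) (y v : Int) (l : List Int) :
    (a ++ y :: l).set a.length v = a ++ v :: l := by
  induction a with
  | nil => rfl
  | cons x a ih => simp [List.set, ih]

theorem passA1_zero (l : List Int) : passA1 l 0 = (l, 0) := by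
  cases l <;> simp [passA1]

theorem passA1_skip (fil rest : List Int) (g : Int) (h : ∀ r ∈ fil, r ≠ 0) :
    passA1 (fil ++ rest) g = (fil ++ (passA1 rest g).1, (passA1 rest g).2) := by
  induction fil with
  | nil => simp
  | cons r fil ih =>
    by_cases hg : g = 0
    · subst hg; simp [passA1_zero]
    · have hr : r ≠ 0 := h r (by simp)
      have ih' := ih (fun x hx => h x (by simp [hx]))
      simp only [List.cons_append, passA1, if_neg hg, if_neg hr, ih']

theorem phase1_neg (z : Nat) (g : Int) (h2 : ¬ 2 ≤ g) (h1 : g ≠ 1) : phase1 z g = (0, 0, g) := by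
  cases z <;> simp [phase1, h2, h1]

theorem passA1_zeros (z : Nat) (g : Int) :
    passA1 (List.replicate z 0) g =
      (List.replicate (phase1 z g).1 2 ++ List.replicate (phase1 z g).2.1 1 ++
        List.replicate (z - (phase1 z g).1 - (phase1 z g).2.1) 0, (phase1 z g).2.2) := by
  induction z generalizing g with
  | zero => simp [phase1, passA1]
  | succ z ih =>
    rw [List.replicate_succ]
    by_cases hg0 : g = 0
    · subst hg0
      rw [passA1_zero]
      simp [phase1, List.replicate_succ]
    · by_cases hg2 : 2 ≤ g
      · have hstep : passA1 ((0 : Int) :: List.replicate z 0) g =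
            (2 :: (passA1 (List.replicate z 0) (g - 2)).1, (passA1 (List.replicate z 0) (g - 2)).2) := by
          simp [passA1, hg0, hg2]
        rw [hstep, ih]
        simp only [phase1, if_pos hg2]
        rw [List.replicate_succ, Nat.succ_sub_succ]
        simp
      · by_cases hg1 : g = 1
        · subst hg1
          have hstep : passA1 ((0 : Int) :: List.replicate z 0) 1 =
              (1 :: (passA1 (List.replicate z 0) 0).1, (passA1 (List.replicate z 0) 0).2) := by
            norm_num [passA1]
          rw [hstep, passA1_zero]
          simp [phase1]
        · have hstep : passA1 ((0 : Int) :: List.replicate z 0) g =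
              ((0 : Int) :: (passA1 (List.replicate z 0) g).1, (passA1 (List.replicate z 0) g).2) := by
            simp [passA1, hg0, hg2, hg1]
          rw [hstep, ih, phase1_neg z g hg2 hg1, phase1_neg (z + 1) g hg2 hg1]
          simp [List.replicate_succ]

theorem fillPairsGo_spec : ∀ (fuel : Nat) (g : Int), g.toNat ≤ fuel → ∀ (z : Nat) (fil : List Int),
    fillPairsGo fuel (fil ++ List.replicate z 0) g (fil.length : Int) =
      (fil ++ List.replicate (phase1 z g).1 2 ++ List.replicate (z - (phase1 z g).1) 0,
       g - 2 * ((phase1 z g).1 : Int), (fil.length : Int) + ((phase1 z g).1 : Int)) := by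
  intro fuel
  induction fuel with
  | zero =>
    intro g hf z fil
    have hg2 : ¬ 2 ≤ g := by omega
    rw [phase1_neg z g hg2 (by omega)]
    simp [fillPairsGo]
  | succ fuel ih =>
    intro g hf z fil
    by_cases hg2 : 2 ≤ g
    · cases z with
      | zero =>
        simp only [fillPairsGo]
        rw [if_neg (by simp)]
        simp [phase1]
      | succ z =>
        simp only [fillPairsGo]
        rw [if_pos ⟨hg2, by simp⟩]
        have hset : (fil ++ List.replicate (z + 1) 0).set ((fil.length : Int)).toNat 2 =
            (fil ++ [2]) ++ List.replicate z 0 := by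
          rw [List.replicate_succ, Int.toNat_natCast, set_len_append]
          simp
        have hlen1 : ((fil.length : Int) + 1) = (((fil ++ [(2 : Int)]).length : Int)) := by simp
        rw [hset, hlen1, ih (g - 2) (by omega) z (fil ++ [2])]
        simp only [phase1, if_pos hg2]
        rw [List.replicate_succ, Nat.succ_sub_succ]
        refine Prod.ext ?_ (Prod.ext ?_ ?_)
        · simp
        · push_cast; ring
        · simp; push_cast; ring
    · simp only [fillPairsGo]
      rw [if_neg (by intro hc; exact hg2 hc.1)]
      by_cases hg1 : g = 1
      · cases z with
        | zero => simp [phase1, hg1]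
        | succ z => simp [phase1, hg2, hg1]
      · rw [phase1_neg z g hg2 hg1]
        simp

theorem fillPairs_spec (z : Nat) (g : Int) (fil : List Int) :
    fillPairs (fil ++ List.replicate z 0) g (fil.length : Int) =
      (fil ++ List.replicate (phase1 z g).1 2 ++ List.replicate (z - (phase1 z g).1) 0,
       g - 2 * ((phase1 z g).1 : Int), (fil.length : Int) + ((phase1 z g).1 : Int)) := by
  unfold fillPairs
  exact fillPairsGo_spec g.toNat g (le_refl _) z fil

theorem topUp_stop (rooms : List Int) (g : Int) (singles : List Int) (s : Int)
    (h : ¬ (0 < g ∧ s < (singles.length : Int))) : topUp rooms g singles s = (rooms, g, s) := by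
  unfold topUp
  cases hgt : g.toNat with
  | zero => rfl
  | succ k => simp only [topUpGo, if_neg h]

theorem topUp_step (rooms : List Int) (g : Int) (singles : List Int) (s : Int)
    (h : 0 < g ∧ s < (singles.length : Int)) :
    topUp rooms g singles s =
      topUp (rooms.set (PySem.List.pyGetD singles s 0).toNat
        (PySem.List.pyGetD rooms (PySem.List.pyGetD singles s 0) 0 + 1)) (g - 1) singles (s + 1) := by
  unfold topUp
  rw [show g.toNat = (g - 1).toNat + 1 from by omega]
  simp only [topUpGo, if_pos h]

theorem phase1_facts (z : Nat) (g : Int) :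
    (phase1 z g).2.1 ≤ 1 ∧ (phase1 z g).1 + (phase1 z g).2.1 ≤ z ∧
    ((phase1 z g).2.1 = 1 ↔ (g - 2 * ((phase1 z g).1 : Int) = 1 ∧ (phase1 z g).1 < z)) ∧
    (phase1 z g).2.2 = g - 2 * ((phase1 z g).1 : Int) - ((phase1 z g).2.1 : Int) := by
  induction z generalizing g with
  | zero =>
    refine ⟨by simp [phase1], by simp [phase1], ?_, by simp [phase1]⟩
    simp [phase1]
  | succ z ih =>
    by_cases hg2 : 2 ≤ g
    · obtain ⟨h1, h2, h3, h4⟩ := ih (g - 2)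
      simp only [phase1, if_pos hg2]
      refine ⟨h1, by omega, ?_, by push_cast at h4 ⊢; omega⟩
      constructor
      · intro ho
        have := h3.mp ho
        push_cast at this ⊢
        omega
      · intro hc
        apply h3.mpr
        push_cast at hc ⊢
        omega
    · by_cases hg1 : g = 1
      · subst hg1
        refine ⟨by simp [phase1, hg2], by simp [phase1, hg2], ?_, by simp [phase1, hg2]⟩
        simp [phase1, hg2]
      · refine ⟨by simp [phase1, hg2, hg1], by simp [phase1, hg2, hg1], ?_, by simp [phase1, hg2, hg1]⟩
        simp [phase1, hg2, hg1]

theorem passA2_zero (l : List Int) : passA2 l 0 = (l, 0) := by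
  cases l <;> simp [passA2]

theorem passA2_cons_ne_one (r : Int) (rs : List Int) (g : Int) (h : r ≠ 1) :
    passA2 (r :: rs) g = (r :: (passA2 rs g).1, (passA2 rs g).2) := by
  by_cases hg : g = 0
  · subst hg; simp [passA2_zero]
  · simp [passA2, hg, h]

theorem onesIdx_append (a b : List Int) :
    onesIdx (a ++ b) = onesIdx a ++ (onesIdx b).map (· + (a.length : Int)) := by
  induction a with
  | nil => simp [onesIdx]
  | cons r a ih =>
    have key : ((onesIdx (a ++ b)).map (· + 1)) =
        (onesIdx a).map (· + 1) ++ (onesIdx b).map (· + (((r :: a).length : Nat) : Int)) := by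
      rw [ih, List.map_append, shift_map]
      congr 1
    by_cases hr : r = 1
    · simp only [List.cons_append, onesIdx, if_pos hr, key]
    · simp only [List.cons_append, onesIdx, if_neg hr, key]

theorem onesIdx_replicate (z : Nat) (v : Int) (h : v ≠ 1) : onesIdx (List.replicate z v) = [] := by
  induction z with
  | zero => rfl
  | succ z ih => simp [List.replicate_succ, onesIdx, h, ih]

theorem passA2_skip (pre rest : List Int) (g : Int) (h : onesIdx pre = []) :
    passA2 (pre ++ rest) g = (pre ++ (passA2 rest g).1, (passA2 rest g).2) := by
  induction pre with
  | nil => simp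
  | cons r pre ih =>
    have hr : r ≠ 1 := by intro hr; simp [onesIdx, hr] at h
    have hp : onesIdx pre = [] := by simpa [onesIdx, hr] using h
    by_cases hg : g = 0
    · subst hg; simp [passA2_zero]
    · simp only [List.cons_append, passA2, if_neg hg, if_neg hr, ih hp]

theorem passA2_no_ones (l : List Int) (g : Int) (h : onesIdx l = []) : passA2 l g = (l, g) := by
  have h2 := passA2_skip l [] g h
  simpa [passA2] using h2

theorem onesIdx_head_split (l : List Int) : ∀ (i : Int) (t : List Int), onesIdx l = i :: t →
    ∃ pre suf, l = pre ++ 1 :: suf ∧ onesIdx pre = [] ∧ i = (pre.length : Int) ∧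
      t = (onesIdx suf).map (· + ((pre.length : Int) + 1)) := by
  induction l with
  | nil => intro i t h; simp [onesIdx] at h
  | cons r rs ih =>
    intro i t h
    by_cases hr : r = 1
    · simp only [onesIdx, if_pos hr, List.cons.injEq] at h
      refine ⟨[], rs, by simp [hr], rfl, by simpa using h.1.symm, ?_⟩
      rw [← h.2]
      apply List.map_congr_left
      intro x _
      norm_num
    · simp only [onesIdx, if_neg hr] at h
      cases hon : onesIdx rs with
      | nil => rw [hon] at h; simp at h
      | cons i' t' =>
        rw [hon] at h
        simp only [List.map_cons, List.cons.injEq] at h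
        obtain ⟨pre, suf, hl, hpre, hi, ht⟩ := ih i' t' hon
        refine ⟨r :: pre, suf, by simp [hl], ?_, ?_, ?_⟩
        · simp [onesIdx, hr, hpre]
        · rw [← h.1, hi]
          push_cast [List.length_cons]
          ring
        · rw [← h.2, ht, shift_map]
          apply List.map_congr_left
          intro x _
          push_cast [List.length_cons]
          ring

theorem topUp_sim (N : Nat) : ∀ (g : Int), g.toNat ≤ N → 0 ≤ g →
    ∀ (rooms singles : List Int) (s : Int), 0 ≤ s → s ≤ (singles.length : Int) →
    singles.drop s.toNat = onesIdx rooms →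
    ∃ s', topUp rooms g singles s = ((passA2 rooms g).1, (passA2 rooms g).2, s') ∧
      0 ≤ s' ∧ s' ≤ (singles.length : Int) ∧ singles.drop s'.toNat = onesIdx (passA2 rooms g).1 := by
  induction N with
  | zero =>
    intro g hN hg rooms singles s hs0 hs1 hinv
    have hg0 : g = 0 := by omega
    subst hg0
    rw [topUp_stop _ _ _ _ (by simp), passA2_zero]
    exact ⟨s, rfl, hs0, hs1, hinv⟩
  | succ N ih =>
    intro g hN hg rooms singles s hs0 hs1 hinv
    by_cases hg0 : g = 0
    · subst hg0
      rw [topUp_stop _ _ _ _ (by simp), passA2_zero]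
      exact ⟨s, rfl, hs0, hs1, hinv⟩
    · by_cases hsl : s < (singles.length : Int)
      · have hslN : s.toNat < singles.length := by omega
        cases hon : onesIdx rooms with
        | nil =>
          exfalso
          rw [hon] at hinv
          have := congrArg List.length hinv
          simp [List.length_drop] at this
          omega
        | cons i tl =>
          rw [hon] at hinv
          obtain ⟨pre, suf, hl, hpre, hi, htl⟩ := onesIdx_head_split rooms i tl hon
          -- the queue head is i
          have hq : singles[s.toNat]? = some i := by
            have h0 : (singles.drop s.toNat)[0]? = some i := by rw [hinv]; rfl
            rw [List.getElem?_drop] at h0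
            simpa using h0
          have hget : PySem.List.pyGetD singles s 0 = i := by
            rw [PySem.List.pyGetD_eq_getElem _ _ hs0 hsl]
            rw [List.getElem?_eq_getElem hslN] at hq
            exact Option.some.inj hq
          have hival : PySem.List.pyGetD rooms i 0 = 1 := by
            rw [hl, hi, PySem.List.pyGetD_natCast]
            rw [List.getD_eq_getElem?_getD, List.getElem?_append_right (le_refl pre.length)]
            simp
          have hset : rooms.set i.toNat (PySem.List.pyGetD rooms i 0 + 1) = pre ++ 2 :: suf := by
            rw [hival, hl, hi, Int.toNat_natCast, set_len_append]
            norm_num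
          rw [topUp_step _ _ _ _ ⟨by omega, hsl⟩, hget, hset]
          have hs1' : (s + 1).toNat = s.toNat + 1 := by omega
          have hdrop' : singles.drop (s + 1).toNat = tl := by
            rw [hs1']
            have h2 := congrArg (List.drop 1) hinv
            rw [List.drop_drop] at h2
            simpa using h2
          have hones' : onesIdx (pre ++ 2 :: suf) = tl := by
            rw [onesIdx_append, hpre]
            have h21 : onesIdx ((2 : Int) :: suf) = (onesIdx suf).map (· + 1) := by
              norm_num [onesIdx]
            rw [h21, List.nil_append, htl, List.map_map]
            apply List.map_congr_left
            intro x _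
            simp only [Function.comp_apply]
            ring
          obtain ⟨s', htop, hs0', hsl', hinv'⟩ :=
            ih (g - 1) (by omega) (by omega) (pre ++ 2 :: suf) singles (s + 1) (by omega)
              (by omega) (by rw [hdrop', hones'])
          have hA : passA2 rooms g =
              (pre ++ (1 + 1) :: (passA2 suf (g - 1)).1, (passA2 suf (g - 1)).2) := by
            rw [hl, passA2_skip _ _ _ hpre]
            have h1s : passA2 ((1 : Int) :: suf) g =
                ((1 + 1) :: (passA2 suf (g - 1)).1, (passA2 suf (g - 1)).2) := by
              simp [passA2, hg0]
            rw [h1s]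
          have hB : passA2 (pre ++ 2 :: suf) (g - 1) =
              (pre ++ 2 :: (passA2 suf (g - 1)).1, (passA2 suf (g - 1)).2) := by
            rw [passA2_skip _ _ _ hpre, passA2_cons_ne_one 2 suf (g - 1) (by norm_num)]
          refine ⟨s', ?_, hs0', hsl', ?_⟩
          · rw [htop, hA, hB]
            norm_num
          · rw [hA]
            rw [hB] at hinv'
            norm_num at hinv' ⊢
            exact hinv'
      · -- queue exhausted: no room holds exactly one guest
        have hslen : s.toNat = singles.length := by omega
        have hones : onesIdx rooms = [] := by
          rw [← hinv, hslen, List.drop_length]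
        rw [topUp_stop _ _ _ _ (by intro hc; exact hsl hc.2), passA2_no_ones _ _ hones]
        exact ⟨s, rfl, hs0, hs1, hinv⟩

theorem passA2_struct (fil : List Int) (z : Nat) : ∀ (g : Int), (∀ r ∈ fil, r = 1 ∨ r = 2) →
    ∃ fil', (passA2 (fil ++ List.replicate z 0) g).1 = fil' ++ List.replicate z 0 ∧
      fil'.length = fil.length ∧ ∀ r ∈ fil', r = 1 ∨ r = 2 := by
  induction fil with
  | nil =>
    intro g _
    refine ⟨[], ?_, rfl, by simp⟩
    rw [List.nil_append, passA2_no_ones _ _ (onesIdx_replicate z 0 (by norm_num))]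
  | cons r fil ih =>
    intro g h
    have hr := h r (by simp)
    have hfil : ∀ x ∈ fil, x = 1 ∨ x = 2 := fun x hx => h x (by simp [hx])
    by_cases hg : g = 0
    · subst hg
      rw [passA2_zero]
      exact ⟨r :: fil, rfl, rfl, h⟩
    · by_cases hr1 : r = 1
      · obtain ⟨fil', h1, h2, h3⟩ := ih (g - 1) hfil
        refine ⟨(r + 1) :: fil', ?_, by simp [h2], ?_⟩
        · simp only [List.cons_append, passA2, if_neg hg, if_pos hr1]
          simp [h1]
        · intro x hx
          rcases List.mem_cons.mp hx with hx | hx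
          · right; omega
          · exact h3 x hx
      · obtain ⟨fil', h1, h2, h3⟩ := ih g hfil
        refine ⟨r :: fil', ?_, by simp [h2], ?_⟩
        · simp only [List.cons_append, passA2, if_neg hg, if_neg hr1]
          simp [h1]
        · intro x hx
          rcases List.mem_cons.mp hx with hx | hx
          · subst hx; exact hr
          · exact h3 x hx

theorem stepBcore_sim (rooms : List Int) (p : Int) (singles : List Int) (s : Int) (g : Int)
    (h : InvB rooms p singles s) :
    ∃ p' singles' s', stepBcore (rooms, p, singles, s) g = (stepArranged rooms g, p', singles', s') ∧
      InvB (stepArranged rooms g) p' singles' s' := by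
  obtain ⟨⟨fil, z, hr, hfil, hp⟩, hs0, hs1, hdrop⟩ := h
  subst hr
  subst hp
  obtain ⟨ho1, htz, hoiff, hrest⟩ := phase1_facts z g
  have hfil0 : ∀ r ∈ fil, r ≠ 0 := fun r hrm => by rcases hfil r hrm with h' | h' <;> omega
  have hA1 : passA1 (fil ++ List.replicate z 0) g =
      (fil ++ (List.replicate (phase1 z g).1 2 ++ List.replicate (phase1 z g).2.1 1 ++
        List.replicate (z - (phase1 z g).1 - (phase1 z g).2.1) 0), (phase1 z g).2.2) := by
    rw [passA1_skip _ _ _ hfil0, passA1_zeros]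
  have honesfil : onesIdx (fil ++ List.replicate z 0) = onesIdx fil := by
    rw [onesIdx_append, onesIdx_replicate z 0 (by norm_num)]
    simp
  have honesfil2 : onesIdx (fil ++ List.replicate (phase1 z g).1 2) = onesIdx fil := by
    rw [onesIdx_append, onesIdx_replicate _ 2 (by norm_num)]
    simp
  unfold stepBcore
  dsimp only
  rw [fillPairs_spec]
  by_cases hcase : (phase1 z g).2.1 = 1
  · -- a single guest is left over and placed in a fresh room
    obtain ⟨hco1, hco2⟩ := hoiff.mp hcase
    have hrest0 : (phase1 z g).2.2 = 0 := by rw [hrest, hcase]; push_cast; omega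
    obtain ⟨w, hw⟩ : ∃ w, z - (phase1 z g).1 = w + 1 := ⟨z - (phase1 z g).1 - 1, by omega⟩
    have hw' : z - (phase1 z g).1 - 1 = w := by omega
    have hArr : stepArranged (fil ++ List.replicate z 0) g =
        (fil ++ List.replicate (phase1 z g).1 2) ++ 1 :: List.replicate w 0 := by
      unfold stepArranged
      rw [hA1]
      dsimp only
      rw [hrest0, if_neg (lt_irrefl 0), hcase, hw']
      simp [List.append_assoc]
    have hcond : g - 2 * ((phase1 z g).1 : Int) = 1 ∧
        ((fil.length : Int) + ((phase1 z g).1 : Int) <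
          ((fil ++ List.replicate (phase1 z g).1 2 ++ List.replicate (z - (phase1 z g).1) 0).length : Int)) := by
      refine ⟨hco1, ?_⟩
      simp only [List.length_append, List.length_replicate]
      push_cast
      omega
    rw [if_pos hcond]
    have htn : ((fil.length : Int) + ((phase1 z g).1 : Int)).toNat =
        (fil ++ List.replicate (phase1 z g).1 2).length := by
      simp only [List.length_append, List.length_replicate]
      omega
    have hset : (fil ++ List.replicate (phase1 z g).1 2 ++ List.replicate (z - (phase1 z g).1) 0).set
        ((fil.length : Int) + ((phase1 z g).1 : Int)).toNat 1 =
        (fil ++ List.replicate (phase1 z g).1 2) ++ 1 :: List.replicate w 0 := by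
      rw [hw, List.replicate_succ, htn, set_len_append]
    rw [hset]
    rw [topUp_stop _ _ _ _ (by simp)]
    refine ⟨(fil.length : Int) + ((phase1 z g).1 : Int) + 1,
      singles ++ [(fil.length : Int) + ((phase1 z g).1 : Int)], s, ?_, ?_⟩
    · rw [hArr]
    · refine ⟨⟨(fil ++ List.replicate (phase1 z g).1 2) ++ [1], w, ?_, ?_, ?_⟩, hs0, ?_, ?_⟩
      · rw [hArr]
        simp [List.append_assoc]
      · intro r hrm
        simp only [List.append_assoc, List.mem_append, List.mem_replicate,
          List.mem_singleton] at hrm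
        rcases hrm with h' | h'
        · exact hfil r h'
        · rcases h' with h' | h'
          · right; exact h'.2
          · left; exact h'
      · simp only [List.length_append, List.length_replicate, List.length_cons,
          List.length_nil]
        push_cast
        ring
      · simp only [List.length_append, List.length_cons, List.length_nil]
        push_cast
        omega
      · rw [List.drop_append_of_le_length (by omega), hdrop, honesfil, hArr]
        rw [onesIdx_append, honesfil2]
        have h1 : onesIdx ((1 : Int) :: List.replicate w 0) = [0] := by
          simp [onesIdx, onesIdx_replicate w 0 (by norm_num)]
        rw [h1]
        simp only [List.map_cons, List.map_nil, zero_add, List.length_append,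
          List.length_replicate]
        congr 2
  · -- no single left over for a fresh room
    have hne : ¬ (g - 2 * ((phase1 z g).1 : Int) = 1 ∧ (phase1 z g).1 < z) :=
      fun hc => hcase (hoiff.mpr hc)
    have ho0 : (phase1 z g).2.1 = 0 := by omega
    have hcondne : ¬ (g - 2 * ((phase1 z g).1 : Int) = 1 ∧
        ((fil.length : Int) + ((phase1 z g).1 : Int) <
          ((fil ++ List.replicate (phase1 z g).1 2 ++ List.replicate (z - (phase1 z g).1) 0).length : Int))) := by
      intro hc
      apply hne
      refine ⟨hc.1, ?_⟩
      have h2 := hc.2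
      simp only [List.length_append, List.length_replicate] at h2
      push_cast at h2
      omega
    rw [if_neg hcondne]
    have hr2 : (phase1 z g).2.2 = g - 2 * ((phase1 z g).1 : Int) := by
      rw [hrest, ho0]; push_cast; ring
    have hArr1 : stepArranged (fil ++ List.replicate z 0) g =
        (if 0 < g - 2 * ((phase1 z g).1 : Int) then
          (passA2 (fil ++ List.replicate (phase1 z g).1 2 ++ List.replicate (z - (phase1 z g).1) 0)
            (g - 2 * ((phase1 z g).1 : Int))).1
         else fil ++ List.replicate (phase1 z g).1 2 ++ List.replicate (z - (phase1 z g).1) 0) := by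
      unfold stepArranged
      rw [hA1]
      dsimp only
      rw [hr2, ho0]
      simp only [Nat.sub_zero, List.replicate_zero, List.append_nil, ← List.append_assoc]
    have hones1 : onesIdx (fil ++ List.replicate (phase1 z g).1 2 ++
        List.replicate (z - (phase1 z g).1) 0) = onesIdx fil := by
      rw [onesIdx_append, honesfil2, onesIdx_replicate _ 0 (by norm_num)]
      simp
    by_cases hg1 : 0 < g - 2 * ((phase1 z g).1 : Int)
    · obtain ⟨s', htop, hs0', hsl', hinv'⟩ :=
        topUp_sim (g - 2 * ((phase1 z g).1 : Int)).toNat (g - 2 * ((phase1 z g).1 : Int)) (le_refl _)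
          (by omega) (fil ++ List.replicate (phase1 z g).1 2 ++ List.replicate (z - (phase1 z g).1) 0)
          singles s hs0 hs1 (by rw [hdrop, honesfil, hones1])
      obtain ⟨fil', hs1eq, hs2eq, hs3⟩ :=
        passA2_struct (fil ++ List.replicate (phase1 z g).1 2) (z - (phase1 z g).1)
          (g - 2 * ((phase1 z g).1 : Int))
          (by intro r hrm
              rcases List.mem_append.mp hrm with h' | h'
              · exact hfil r h'
              · right; exact (List.mem_replicate.mp h').2)
      refine ⟨(fil.length : Int) + ((phase1 z g).1 : Int), singles, s', ?_, ?_⟩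
      · rw [htop, hArr1, if_pos hg1]
      · refine ⟨⟨fil', z - (phase1 z g).1, ?_, hs3, ?_⟩, hs0', hsl', ?_⟩
        · rw [hArr1, if_pos hg1, hs1eq]
        · rw [hs2eq]
          push_cast [List.length_append, List.length_replicate]
          ring
        · rw [hArr1, if_pos hg1]
          exact hinv'
    · rw [topUp_stop _ _ _ _ (by intro hc; exact hg1 hc.1)]
      refine ⟨(fil.length : Int) + ((phase1 z g).1 : Int), singles, s, ?_, ?_⟩
      · rw [hArr1, if_neg hg1]
      · refine ⟨⟨fil ++ List.replicate (phase1 z g).1 2, z - (phase1 z g).1, ?_, ?_, ?_⟩,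
          hs0, hs1, ?_⟩
        · rw [hArr1, if_neg hg1, List.append_assoc]
        · intro r hrm
          rcases List.mem_append.mp hrm with h' | h'
          · exact hfil r h'
          · right; exact (List.mem_replicate.mp h').2
        · push_cast [List.length_append, List.length_replicate]
          ring
        · rw [hArr1, if_neg hg1, hones1, hdrop, honesfil]

theorem stepA_fst (arr d : List Int) (k : Int) :
    (stepA (arr, d) k).1 = stepArranged arr (PySem.List.pyGetD d k 0) := by
  unfold stepA stepArranged
  dsimp only
  split <;> rfl

theorem stepA_snd (arr d : List Int) (k : Int) :
    ∃ v, (stepA (arr, d) k).2 = d.set k.toNat v := by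
  unfold stepA
  dsimp only
  split
  · exact ⟨_, List.set_set _⟩
  · exact ⟨_, rfl⟩

theorem pyGetD_set_lt (d : List Int) (k j v : Int) (hk : 0 ≤ k) (hkj : k < j)
    (hjlen : j < (d.length : Int)) :
    PySem.List.pyGetD (d.set k.toNat v) j 0 = PySem.List.pyGetD d j 0 := by
  have h0j : 0 ≤ j := by omega
  have hjlen' : j < ((d.set k.toNat v).length : Int) := by simpa using hjlen
  rw [PySem.List.pyGetD_eq_getElem _ _ h0j hjlen', PySem.List.pyGetD_eq_getElem _ _ h0j hjlen]
  exact List.getElem_set_ne (by omega) _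

theorem loop_sim (doan : List Int) (ks : List Int) (hge : ∀ k ∈ ks, 0 ≤ k)
    (hlt : ∀ k ∈ ks, k < (doan.length : Int)) (hpw : ks.Pairwise (· < ·)) :
    ∀ (d rooms : List Int) (p : Int) (singles : List Int) (s : Int),
      d.length = doan.length → InvB rooms p singles s →
      (∀ k ∈ ks, PySem.List.pyGetD d k 0 = PySem.List.pyGetD doan k 0) →
      (ks.foldl stepA (rooms, d)).1 = (ks.foldl (stepB doan) (rooms, p, singles, s)).1 := by
  induction ks with
  | nil => intro d rooms p singles s _ _ _; rfl
  | cons k ks ih =>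
    intro d rooms p singles s hdlen hinv hagree
    simp only [List.foldl_cons]
    have hgk := hagree k (by simp)
    obtain ⟨p', singles', s', hB, hinv'⟩ :=
      stepBcore_sim rooms p singles s (PySem.List.pyGetD doan k 0) hinv
    have hstepB : stepB doan (rooms, p, singles, s) k =
        (stepArranged rooms (PySem.List.pyGetD doan k 0), p', singles', s') := hB
    obtain ⟨v, hsnd⟩ := stepA_snd rooms d k
    have hfst := stepA_fst rooms d k
    have hAeq : stepA (rooms, d) k =
        (stepArranged rooms (PySem.List.pyGetD doan k 0), d.set k.toNat v) := by
      have hpair : stepA (rooms, d) k = ((stepA (rooms, d) k).1, (stepA (rooms, d) k).2) := rfl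
      rw [hpair, hfst, hgk, hsnd]
    rw [hAeq, hstepB]
    apply ih
    · exact fun x hx => hge x (by simp [hx])
    · exact fun x hx => hlt x (by simp [hx])
    · exact (List.pairwise_cons.mp hpw).2
    · simp [hdlen]
    · exact hinv'
    · intro j hj
      have hk0 := hge k (by simp)
      have hkj : k < j := (List.pairwise_cons.mp hpw).1 j hj
      have hjlen : j < (d.length : Int) := by rw [hdlen]; exact hlt j (by simp [hj])
      rw [pyGetD_set_lt d k j v hk0 hkj hjlen]
      exact hagree j (by simp [hj])

theorem foldl_append_zero (l : List Int) : ∀ (acc : List Int),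
    l.foldl (fun a _ => a ++ [(0 : Int)]) acc = acc ++ List.replicate l.length 0 := by
  induction l with
  | nil => intro acc; simp
  | cons x l ih =>
    intro acc
    simp only [List.foldl_cons, List.length_cons, ih]
    rw [List.append_assoc]
    congr 1

-- ===== VERDICT (by name: the statement is the Claim_ definition above) =====
theorem arrange_room_spec : Claim_equal_arrange_room := by
  unfold Claim_equal_arrange_room
  intro n m doan _ hpre
  unfold Spec_arrange_room arrange_room arrange_room_alt
  have hinit : (PySem.List.pyRange 0 n 1).foldl (fun a _ => a ++ [(0 : Int)]) [] =
      List.replicate n.toNat 0 := by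
    rw [foldl_append_zero]
    simp [PySem.List.length_pyRange_one]
  rw [hinit]
  apply loop_sim doan (PySem.List.pyRange 0 m 1)
    (fun k hk => (PySem.List.mem_pyRange_one.mp hk).1)
    (fun k hk => by
      have := (PySem.List.mem_pyRange_one.mp hk).2
      unfold Pre_arrange_room at hpre
      omega)
    (PySem.List.pairwise_lt_pyRange_one 0 m)
    doan _ 0 [] 0 rfl
    ⟨⟨[], n.toNat, by simp, by simp, by simp⟩, le_refl 0, by simp, by
      simp [onesIdx_replicate n.toNat 0 (by norm_num)]⟩
    (fun j _ => rfl)
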